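-- pv_equiv track=rewrite | github.com/trolen/advent-of-code | 2018/day06/day06.py | build_grid_with_areas
-- ===== SOURCE A (Python) =====
-- def get_grid_dimensions(points):
--     max_x = 0
--     max_y = 0
--     for point in points:
--         if point[0] > max_x:
--             max_x = point[0]
--         if point[1] > max_y:
--             max_y = point[1]
--     max_x += 1
--     max_y += 1
--     return (max_x, max_y)
--
-- def manhattan_distance(p1, p2):
--     n1 = abs(p2[0] - p1[0])
--     n2 = abs(p2[1] - p1[1])
--     return n1 + n2
--
-- def build_grid_with_areas(points):
--     (max_x, max_y) = get_grid_dimensions(points)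
--     grid = []
--     for y in range(0, max_y):
--         row = []
--         for x in range(0, max_x):
--             min_distance = None
--             point_idx = None
--             for i in range(0, len(points)):
--                 point = points[i]
--                 if point[0] == x and point[1] == y:
--                     min_distance = 0
--                     point_idx = i
--                     break
--                 d = manhattan_distance(point, (x,y))
--                 if min_distance is None or d < min_distance:
--                     min_distance = d
--                     point_idx = i
--                 elif d == min_distance:
--                     point_idx = -1
--             row.append(point_idx)
--         grid.append(row)
--     return grid
-- ===== SOURCE B (Python) =====
-- def build_grid_with_areas(points):
--     # 1-D additively-weighted distance-transform sweeps per row: bucket the points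
--     # by x once, then for each row compute nearest-label summaries by a left-to-right
--     # and a right-to-left DP pass over the columns -- no per-cell scan of the points.
--     w = max([0] + [p[0] for p in points]) + 1
--     h = max([0] + [p[1] for p in points]) + 1
--
--     def combine(s, t):
--         if s is None:
--             return t
--         if t is None:
--             return s
--         if s[0] < t[0]:
--             return s
--         if t[0] < s[0]:
--             return t
--         return (s[0], True, min(s[2], t[2]))
--
--     def shift(s):
--         return None if s is None else (s[0] + 1, s[1], s[2])
--
--     trip = [(px, py, i) for (i, (px, py)) in enumerate(points)]
--     left = [t for t in trip if t[0] < 0]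
--     right = [t for t in trip if t[0] >= w]
--     mid = [(px, (py, i)) for (px, py, i) in trip if 0 <= px < w]
--     buckets = {}
--     for (px, e) in mid:
--         buckets[px] = buckets.get(px, []) + [e]
--
--     def row(y):
--         # pre[x] = summary (min dist, tie?, least index) over points with px <= x
--         cur = None
--         for (px, py, i) in left:
--             cur = combine(cur, (abs(py - y) + (-1 - px), False, i))
--         pre = []
--         for x in range(w):
--             cur = shift(cur)
--             for (py, i) in buckets.get(x, []):
--                 cur = combine(cur, (abs(py - y), False, i))
--             pre.append(cur)
--         # suf[x] = the same summary over points with px > x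
--         cur = None
--         for (px, py, i) in right:
--             cur = combine(cur, (abs(py - y) + (px - (w - 1)), False, i))
--         rev = [cur]
--         for x in range(w - 2, -1, -1):
--             for (py, i) in buckets.get(x + 1, []):
--                 cur = combine(cur, (abs(py - y), False, i))
--             cur = shift(cur)
--             rev.append(cur)
--         suf = rev[::-1]
--         out = []
--         for (p, s) in zip(pre, suf):
--             (m, multi, idx) = combine(p, s)
--             out.append(-1 if (multi and m > 0) else idx)
--         return out
--
--     return [row(y) for y in range(h)]
-- ===== Notes on version B (the rewrite author's own statement) =====
-- stated objective: faster
-- what changed: Replaces the per-cell scan over all points by a per-row 1-D additively-weighted distance transform: points are bucketed by x once, and each row is labeled by a left-to-right and a right-to-left DP sweep that propagate (min distance, tie?, least index) summaries between adjacent columns.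
-- outside the precondition, e.g. on build_grid_with_areas([]): A returns [[None]], B raises TypeError
import Mathlib
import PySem

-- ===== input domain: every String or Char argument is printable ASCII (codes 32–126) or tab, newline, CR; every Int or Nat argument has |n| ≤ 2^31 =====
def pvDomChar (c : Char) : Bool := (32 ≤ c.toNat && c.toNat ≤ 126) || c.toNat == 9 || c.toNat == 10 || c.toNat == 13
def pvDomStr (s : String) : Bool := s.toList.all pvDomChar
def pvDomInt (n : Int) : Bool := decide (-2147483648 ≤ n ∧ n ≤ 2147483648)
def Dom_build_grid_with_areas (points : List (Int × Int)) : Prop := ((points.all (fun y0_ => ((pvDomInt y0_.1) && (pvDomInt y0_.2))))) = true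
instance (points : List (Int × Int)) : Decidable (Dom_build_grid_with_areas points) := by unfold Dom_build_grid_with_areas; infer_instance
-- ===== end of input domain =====

-- B replaces A's per-cell scan over all points by per-row 1-D distance-transform sweeps
-- (points bucketed by x, prefix/suffix DP over columns); objective: faster (asymptotic).


-- ===== PORT A =====
-- get_grid_dimensions: running max over the points starting at (0, 0), then +1 each
def pvDimsA (points : List (Int × Int)) : Int × Int :=
  let m := points.foldl
    (fun (acc : Int × Int) p =>
      (if p.1 > acc.1 then p.1 else acc.1, if p.2 > acc.2 then p.2 else acc.2))
    (0, 0)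
  (m.1 + 1, m.2 + 1)

-- the inner 'for i in range(0, len(points))' loop with state (min_distance, point_idx);
-- returns point_idx (the break is the early exit on an exact coincidence)
def pvLoopA : List (Int × Int) → Int → Int → Int → Option Int → Option Int → Option Int
  | [], _, _, _, _, pi => pi
  | p :: rest, x, y, i, md, pi =>
    if p.1 = x ∧ p.2 = y then some i
    else
      let d := |x - p.1| + |y - p.2|
      match md with
      | none => pvLoopA rest x y (i + 1) (some d) (some i)
      | some m =>
        if d < m then pvLoopA rest x y (i + 1) (some d) (some i)
        else if d = m then pvLoopA rest x y (i + 1) (some m) (some (-1))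
        else pvLoopA rest x y (i + 1) (some m) pi

def build_grid_with_areas (points : List (Int × Int)) : List (List Int) :=
  let dims := pvDimsA points
  (PySem.List.pyRange 0 dims.2 1).foldl
    (fun grid y =>
      grid ++ [(PySem.List.pyRange 0 dims.1 1).foldl
        (fun row x =>
          -- point_idx is None only when points = [] (excluded by Pre_): .getD 0
          row ++ [(pvLoopA points x y 0 none none).getD 0])
        []])
    []

-- ===== PORT B =====
-- combine(s, t): pick the summary with the smaller min distance; a tie of minima
-- yields (m, True, least index)
def pvComb : Option (Int × Bool × Int) → Option (Int × Bool × Int) → Option (Int × Bool × Int)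
  | none, t => t
  | some a, none => some a
  | some a, some b =>
    if a.1 < b.1 then some a
    else if b.1 < a.1 then some b
    else some (a.1, true, min a.2.2 b.2.2)

-- shift(s): move one column away
def pvShift (s : Option (Int × Bool × Int)) : Option (Int × Bool × Int) :=
  s.map (fun a => (a.1 + 1, a.2.1, a.2.2))

-- row(y): the two DP sweeps over the columns, then extraction cell by cell
def pvRowB (w : Int) (buckets : PySem.Dict Int (List (Int × Int)))
    (left right : List (Int × Int × Int)) (y : Int) : List Int :=
  let cur0 := left.foldl
    (fun c t => pvComb c (some (|t.2.1 - y| + (-1 - t.1), false, t.2.2))) none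
  let ps := (PySem.List.pyRange 0 w 1).foldl
    (fun (st : Option (Int × Bool × Int) × List (Option (Int × Bool × Int))) x =>
      let c1 := pvShift st.1
      let c2 := (buckets.getD x []).foldl
        (fun c e => pvComb c (some (|e.1 - y|, false, e.2))) c1
      (c2, st.2 ++ [c2]))
    (cur0, [])
  let cur1 := right.foldl
    (fun c t => pvComb c (some (|t.2.1 - y| + (t.1 - (w - 1)), false, t.2.2))) none
  let rs := (PySem.List.pyRange (w - 2) (-1) (-1)).foldl
    (fun (st : Option (Int × Bool × Int) × List (Option (Int × Bool × Int))) x =>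
      let c2 := (buckets.getD (x + 1) []).foldl
        (fun c e => pvComb c (some (|e.1 - y|, false, e.2))) st.1
      let c3 := pvShift c2
      (c3, st.2 ++ [c3]))
    (cur1, [cur1])
  let suf := (PySem.List.slice? rs.2 none none (-1)).getD []   -- rev[::-1]
  (ps.2.zip suf).map (fun pq =>
    -- the combined summary is None only when points = [] (excluded by Pre_): .getD
    let t := (pvComb pq.1 pq.2).getD (0, false, 0)
    if t.2.1 ∧ t.1 > 0 then -1 else t.2.2)

def build_grid_with_areas_alt (points : List (Int × Int)) : List (List Int) :=
  let w := (PySem.List.max? ((0 : Int) :: points.map (·.1)) (fun v => v)).getD 0 + 1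
  let h := (PySem.List.max? ((0 : Int) :: points.map (·.2)) (fun v => v)).getD 0 + 1
  let trip := (PySem.List.enumerate points 0).map (fun e => (e.2.1, e.2.2, e.1))
  let left := trip.filter (fun t => t.1 < 0)
  let right := trip.filter (fun t => t.1 ≥ w)
  let mid := (trip.filter (fun t => 0 ≤ t.1 ∧ t.1 < w)).map (fun t => (t.1, (t.2.1, t.2.2)))
  let buckets := mid.foldl (fun d p => d.modify p.1 [] (· ++ [p.2])) PySem.Dict.empty
  (PySem.List.pyRange 0 h 1).map (pvRowB w buckets left right)

-- ===== PRECONDITION & SPEC =====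
-- Pre_ excludes the empty list: there A puts None (not an int) in the grid, and B raises TypeError.
def Pre_build_grid_with_areas (points : List (Int × Int)) : Prop := points ≠ []
instance (points : List (Int × Int)) : Decidable (Pre_build_grid_with_areas points) := by
  unfold Pre_build_grid_with_areas; infer_instance

def pvWitness_build_grid_with_areas : (List (Int × Int)) := [(1, 0), (0, 1)]

def Spec_build_grid_with_areas (points : List (Int × Int)) (out : List (List Int)) : Prop := out = build_grid_with_areas_alt points
instance (points : List (Int × Int)) (out : List (List Int)) : Decidable (Spec_build_grid_with_areas points out) := by unfold Spec_build_grid_with_areas; infer_instance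

-- ===== CLAIM (what is proved, stated in full; the proofs are below) =====
def Claim_equal_build_grid_with_areas : Prop := ∀ (points : List (Int × Int)), Dom_build_grid_with_areas points → Pre_build_grid_with_areas points → Spec_build_grid_with_areas points (build_grid_with_areas points)

-- ===== LEMMAS AND PROOFS =====

-- the enumerated points as (px, py, index) triples
def pvTrip : List (Int × Int) → Int → List (Int × Int × Int)
  | [], _ => []
  | p :: t, k => (p.1, p.2, k) :: pvTrip t (k + 1)

-- evaluate a triple list at cell (x, y): (distance, index) pairs
def pvEvalL (L : List (Int × Int × Int)) (x y : Int) : List (Int × Int) :=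
  L.map (fun e => (|x - e.1| + |y - e.2.1|, e.2.2))

-- the summary of a candidate list
def pvSum (l : List (Int × Int)) : Option (Int × Bool × Int) :=
  l.foldr (fun a acc => pvComb (some (a.1, false, a.2)) acc) none

-- the reference value of one cell
def pvRef (points : List (Int × Int)) (x y : Int) : Int :=
  match pvSum (pvEvalL (pvTrip points 0) x y) with
  | none => 0
  | some t => if t.2.1 ∧ t.1 > 0 then -1 else t.2.2

lemma pvComb_none_right (s : Option (Int × Bool × Int)) : pvComb s none = s := by
  cases s <;> rfl

lemma pvComb_assoc (a b c : Option (Int × Bool × Int)) :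
    pvComb (pvComb a b) c = pvComb a (pvComb b c) := by
  rcases a with _ | ⟨ma, fa, ia⟩ <;> rcases b with _ | ⟨mb, fb, ib⟩ <;>
    rcases c with _ | ⟨mc, fc, ic⟩ <;>
    simp only [pvComb] <;> split_ifs <;> simp_all [pvComb, Prod.ext_iff] <;> split_ifs <;>
    simp_all <;> omega

lemma pvComb_comm_aux (a b : Option (Int × Bool × Int)) : pvComb a b = pvComb b a := by
  rcases a with _ | ⟨ma, fa, ia⟩ <;> rcases b with _ | ⟨mb, fb, ib⟩ <;>
    simp only [pvComb] <;> split_ifs <;> simp_all [Prod.ext_iff] <;> omega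

lemma pvSum_cons (a : Int × Int) (l : List (Int × Int)) :
    pvSum (a :: l) = pvComb (some (a.1, false, a.2)) (pvSum l) := rfl

lemma pvSum_append (l1 l2 : List (Int × Int)) :
    pvSum (l1 ++ l2) = pvComb (pvSum l1) (pvSum l2) := by
  induction l1 with
  | nil => rfl
  | cons a t ih =>
    rw [List.cons_append, pvSum_cons, pvSum_cons, ih, pvComb_assoc]

lemma pvSum_perm {l1 l2 : List (Int × Int)} (h : l1.Perm l2) : pvSum l1 = pvSum l2 := by
  induction h with
  | nil => rfl
  | cons a _ ih => rw [pvSum_cons, pvSum_cons, ih]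
  | swap a b l =>
    rw [pvSum_cons, pvSum_cons, pvSum_cons, pvSum_cons, ← pvComb_assoc, ← pvComb_assoc,
        pvComb_comm_aux (some (b.1, false, b.2))]
  | trans _ _ ih1 ih2 => rw [ih1, ih2]

lemma pvSum_idx_ge (k : Int) : ∀ (l : List (Int × Int)) (s : Int × Bool × Int),
    (∀ a ∈ l, k ≤ a.2) → pvSum l = some s → k ≤ s.2.2 := by
  intro l
  induction l with
  | nil => intro s _ h; cases h
  | cons a t ih =>
    intro s hmem hs
    rw [pvSum_cons] at hs
    cases ht : pvSum t with
    | none => rw [ht, pvComb_none_right, Option.some_inj] at hs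
              rw [← hs]
              simpa using hmem a (by simp)
    | some r =>
      have hr := ih r (fun b hb => hmem b (by simp [hb])) ht
      have ha := hmem a (by simp)
      rw [ht] at hs
      simp only [pvComb] at hs
      split_ifs at hs <;> rw [Option.some_inj] at hs <;> rw [← hs] <;> simp_all <;> omega

lemma pvSum_m_nonneg : ∀ (l : List (Int × Int)) (s : Int × Bool × Int),
    (∀ a ∈ l, 0 ≤ a.1) → pvSum l = some s → 0 ≤ s.1 := by
  intro l
  induction l with
  | nil => intro s _ h; cases h
  | cons a t ih =>
    intro s hmem hs
    rw [pvSum_cons] at hs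
    cases ht : pvSum t with
    | none => rw [ht, pvComb_none_right, Option.some_inj] at hs
              rw [← hs]
              simpa using hmem a (by simp)
    | some r =>
      have hr := ih r (fun b hb => hmem b (by simp [hb])) ht
      have ha := hmem a (by simp)
      rw [ht] at hs
      simp only [pvComb] at hs
      split_ifs at hs <;> rw [Option.some_inj] at hs <;> rw [← hs] <;> simp_all

lemma pvEval_idx_ge (x y : Int) : ∀ (pts : List (Int × Int)) (k : Int),
    ∀ a ∈ pvEvalL (pvTrip pts k) x y, k ≤ a.2 := by
  intro pts
  induction pts with
  | nil => intro k a ha; simp [pvTrip, pvEvalL] at ha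
  | cons p t ih =>
    intro k a ha
    simp only [pvTrip, pvEvalL, List.map_cons, List.mem_cons] at ha
    rcases ha with rfl | ha
    · omega
    · have := ih (k + 1) a ha
      omega

lemma pvEval_d_nonneg (L : List (Int × Int × Int)) (x y : Int) :
    ∀ a ∈ pvEvalL L x y, 0 ≤ a.1 := by
  intro a ha
  simp only [pvEvalL, List.mem_map] at ha
  obtain ⟨e, _, rfl⟩ := ha
  have := abs_nonneg (x - e.1)
  have := abs_nonneg (y - e.2.1)
  simp only
  omega

lemma pvDist_eq_zero_iff (p : Int × Int) (x y : Int) :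
    |x - p.1| + |y - p.2| = 0 ↔ p.1 = x ∧ p.2 = y := by
  constructor
  · intro h
    have h1 := abs_nonneg (x - p.1)
    have h2 := abs_nonneg (y - p.2)
    have ha : |x - p.1| = 0 := by omega
    have hb : |y - p.2| = 0 := by omega
    rw [abs_eq_zero] at ha hb
    omega
  · rintro ⟨hx, hy⟩
    simp [hx, hy]

-- state extraction of a summary, as A's loop keeps it
def pvStateIdx (s : Int × Bool × Int) : Int := if s.2.1 then -1 else s.2.2

-- A's inner loop, started after a strictly positive prefix summary s, computes the
-- reference extraction of the whole candidate list
lemma pvLoopA_inv (x y : Int) : ∀ (l : List (Int × Int)) (k : Int) (s : Int × Bool × Int),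
    0 < s.1 →
    pvLoopA l x y k (some s.1) (some (pvStateIdx s)) =
      some (match pvComb (some s) (pvSum (pvEvalL (pvTrip l k) x y)) with
            | none => 0
            | some t => if t.2.1 ∧ t.1 > 0 then -1 else t.2.2) := by
  intro l
  induction l with
  | nil =>
    intro k s hs
    simp only [pvTrip, pvEvalL, List.map_nil]
    rw [show pvSum [] = none from rfl, pvComb_none_right]
    simp only [pvLoopA]
    rcases s with ⟨m, mu, i⟩
    simp only at hs
    cases mu <;> simp [pvStateIdx, hs]
  | cons a t ih =>
    intro k s hs
    have hrec : pvEvalL (pvTrip (a :: t) k) x y =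
        (|x - a.1| + |y - a.2|, k) :: pvEvalL (pvTrip t (k + 1)) x y := rfl
    by_cases hc : a.1 = x ∧ a.2 = y
    · have hd0 : |x - a.1| + |y - a.2| = 0 := by
        rw [(pvDist_eq_zero_iff a x y).mpr hc]  -- placeholder
      simp only [pvLoopA, if_pos hc]
      rw [hrec, pvSum_cons, hd0, ← pvComb_assoc]
      have h1 : pvComb (some s) (some ((0 : Int), false, k)) = some (0, false, k) := by
        simp only [pvComb]
        rw [if_neg (by omega), if_pos (by omega)]
      rw [h1]
      cases hrest : pvSum (pvEvalL (pvTrip t (k + 1)) x y) with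
      | none => simp [pvComb]
      | some r =>
        have hrk : k + 1 ≤ r.2.2 := pvSum_idx_ge (k + 1) _ r (pvEval_idx_ge x y t (k + 1)) hrest
        have hr0 : 0 ≤ r.1 := pvSum_m_nonneg _ r (pvEval_d_nonneg _ x y) hrest
        simp only [pvComb]
        split_ifs with h1 h2 <;> simp_all <;> omega
    · have hd0 : |x - a.1| + |y - a.2| ≠ 0 := fun h => hc ((pvDist_eq_zero_iff a x y).mp h)
      have hdpos : 0 < |x - a.1| + |y - a.2| := by
        have := abs_nonneg (x - a.1); have := abs_nonneg (y - a.2); omega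
      rw [hrec, pvSum_cons, ← pvComb_assoc]
      rcases s with ⟨m, mu, i⟩
      simp only at hs
      simp only [pvLoopA, if_neg hc]
      set d := |x - a.1| + |y - a.2| with hd
      by_cases h1 : d < m
      · rw [if_pos h1]
        have hcomb : pvComb (some (m, mu, i)) (some (d, false, k)) = some (d, false, k) := by
          simp only [pvComb]
          rw [if_neg (by omega), if_pos h1]
        rw [hcomb]
        have := ih (k + 1) (d, false, k) hdpos
        simpa [pvStateIdx] using this
      · rw [if_neg h1]
        by_cases h2 : d = m
        · rw [if_pos h2]
          have hcomb : pvComb (some (m, mu, i)) (some (d, false, k)) =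
              some (m, true, min i k) := by
            simp only [pvComb]
            rw [if_neg (by omega), if_neg (by omega)]
          rw [hcomb]
          have := ih (k + 1) (m, true, min i k) hs
          simpa [pvStateIdx] using this
        · rw [if_neg h2]
          have hcomb : pvComb (some (m, mu, i)) (some (d, false, k)) = some (m, mu, i) := by
            simp only [pvComb]
            rw [if_pos (by omega)]
          rw [hcomb]
          exact ih (k + 1) (m, mu, i) hs

-- A's cell value is the reference value
lemma pvCellA (points : List (Int × Int)) (hne : points ≠ []) (x y : Int) :
    (pvLoopA points x y 0 none none).getD 0 = pvRef points x y := by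
  cases points with
  | nil => exact absurd rfl hne
  | cons p rest =>
    have hrec : pvEvalL (pvTrip (p :: rest) 0) x y =
        (|x - p.1| + |y - p.2|, 0) :: pvEvalL (pvTrip rest 1) x y := rfl
    unfold pvRef
    rw [hrec, pvSum_cons]
    by_cases hc : p.1 = x ∧ p.2 = y
    · have hd0 : |x - p.1| + |y - p.2| = 0 := by
        rw [(pvDist_eq_zero_iff p x y).mpr hc]
      simp only [pvLoopA, if_pos hc, hd0]
      cases hrest : pvSum (pvEvalL (pvTrip rest 1) x y) with
      | none => simp [pvComb]
      | some r =>
        have hrk : 1 ≤ r.2.2 := pvSum_idx_ge 1 _ r (pvEval_idx_ge x y rest 1) hrest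
        have hr0 : 0 ≤ r.1 := pvSum_m_nonneg _ r (pvEval_d_nonneg _ x y) hrest
        simp only [pvComb]
        split_ifs with h1 h2 <;> simp_all <;> omega
    · have hd0 : |x - p.1| + |y - p.2| ≠ 0 := fun h => hc ((pvDist_eq_zero_iff p x y).mp h)
      have hdpos : 0 < |x - p.1| + |y - p.2| := by
        have := abs_nonneg (x - p.1); have := abs_nonneg (y - p.2); omega
      have hstep : pvLoopA (p :: rest) x y 0 none none =
          pvLoopA rest x y 1 (some (|x - p.1| + |y - p.2|)) (some 0) := by
        simp only [pvLoopA, if_neg hc]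
        norm_num
      rw [hstep]
      have := pvLoopA_inv x y rest 1 (|x - p.1| + |y - p.2|, false, 0) hdpos
      simp only [pvStateIdx, if_neg (by simp : ¬ false = true)] at this
      rw [this]
      rfl

lemma pvDims_eq (points : List (Int × Int)) :
    pvDimsA points =
      ((PySem.List.max? ((0 : Int) :: points.map (·.1)) (fun v => v)).getD 0 + 1,
       (PySem.List.max? ((0 : Int) :: points.map (·.2)) (fun v => v)).getD 0 + 1) := by
  unfold pvDimsA
  dsimp only
  rw [show (fun (acc : Int × Int) (p : Int × Int) =>
        (if p.1 > acc.1 then p.1 else acc.1, if p.2 > acc.2 then p.2 else acc.2)) =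
      (fun (s : Int × Int) (e : Int × Int) =>
        ((fun (acc : Int) (p : Int × Int) => if p.1 > acc then p.1 else acc) s.1 e,
         (fun (acc : Int) (p : Int × Int) => if p.2 > acc then p.2 else acc) s.2 e)) from rfl,
      PySem.List.foldl_prod_mk
        (f := fun (acc : Int) (p : Int × Int) => if p.1 > acc then p.1 else acc)
        (g := fun (acc : Int) (p : Int × Int) => if p.2 > acc then p.2 else acc)]
  rw [PySem.List.max?_id_cons, PySem.List.max?_id_cons]
  simp only [Option.getD_some]
  rw [List.foldl_map, List.foldl_map,
      PySem.List.foldl_congr_mem (l := points) (init := (0 : Int))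
        (f := fun (acc : Int) (p : Int × Int) => if p.1 > acc then p.1 else acc)
        (g := fun (x : Int) (y : Int × Int) => max x y.1)
        (by intro acc p _; simp only [max_def]; split_ifs <;> omega),
      PySem.List.foldl_congr_mem (l := points) (init := (0 : Int))
        (f := fun (acc : Int) (p : Int × Int) => if p.2 > acc then p.2 else acc)
        (g := fun (x : Int) (y : Int × Int) => max x y.2)
        (by intro acc p _; simp only [max_def]; split_ifs <;> omega)]

-- generic summary fold (proof-side only)
def pvSumB {α : Type} (b : α → Option (Int × Bool × Int)) (L : List α) :
    Option (Int × Bool × Int) :=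
  L.foldr (fun e acc => pvComb (b e) acc) none

lemma pvSumB_cons {α : Type} (b : α → Option (Int × Bool × Int)) (a : α) (L : List α) :
    pvSumB b (a :: L) = pvComb (b a) (pvSumB b L) := rfl

lemma pvFoldl_comb {α : Type} (b : α → Option (Int × Bool × Int)) :
    ∀ (L : List α) (s : Option (Int × Bool × Int)),
      L.foldl (fun c e => pvComb c (b e)) s = pvComb s (pvSumB b L) := by
  intro L
  induction L with
  | nil => intro s; rw [List.foldl_nil, pvSumB, List.foldr_nil, pvComb_none_right]
  | cons a t ih =>
    intro s
    rw [List.foldl_cons, ih, pvSumB_cons, ← pvComb_assoc]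

lemma pvSumB_map {α β : Type} (f : α → β) (b : β → Option (Int × Bool × Int)) :
    ∀ L : List α, pvSumB b (L.map f) = pvSumB (fun a => b (f a)) L := by
  intro L
  induction L with
  | nil => rfl
  | cons a t ih => rw [List.map_cons, pvSumB_cons, ih]; rfl

lemma pvSumB_congr {α : Type} {b b' : α → Option (Int × Bool × Int)} :
    ∀ L : List α, (∀ a ∈ L, b a = b' a) → pvSumB b L = pvSumB b' L := by
  intro L
  induction L with
  | nil => intro _; rfl
  | cons a t ih =>
    intro h
    rw [pvSumB_cons, pvSumB_cons, h a (by simp), ih (fun x hx => h x (by simp [hx]))]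

lemma pvSum_evalL (L : List (Int × Int × Int)) (x y : Int) :
    pvSum (pvEvalL L x y) =
      pvSumB (fun e => some (|x - e.1| + |y - e.2.1|, false, e.2.2)) L := by
  unfold pvSum pvEvalL pvSumB
  rw [List.foldr_map]

lemma pvEvalL_append (L1 L2 : List (Int × Int × Int)) (x y : Int) :
    pvEvalL (L1 ++ L2) x y = pvEvalL L1 x y ++ pvEvalL L2 x y := by
  unfold pvEvalL; rw [List.map_append]

lemma pvShift_comb (s t : Option (Int × Bool × Int)) :
    pvShift (pvComb s t) = pvComb (pvShift s) (pvShift t) := by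
  rcases s with _ | ⟨ms, fs, is⟩ <;> rcases t with _ | ⟨mt, ft, it⟩ <;>
    simp only [pvComb, pvShift, Option.map_none, Option.map_some] <;>
    split_ifs <;> simp_all <;> omega

lemma pvShift_evalL (y : Int) :
    ∀ (L : List (Int × Int × Int)) (x x' : Int),
      (∀ t ∈ L, |x' - t.1| = |x - t.1| + 1) →
      pvShift (pvSum (pvEvalL L x y)) = pvSum (pvEvalL L x' y) := by
  intro L
  induction L with
  | nil => intro x x' _; rfl
  | cons a t ih =>
    intro x x' h
    have hc : pvEvalL (a :: t) x y = (|x - a.1| + |y - a.2.1|, a.2.2) :: pvEvalL t x y := rfl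
    have hc' : pvEvalL (a :: t) x' y = (|x' - a.1| + |y - a.2.1|, a.2.2) :: pvEvalL t x' y := rfl
    rw [hc, hc', pvSum_cons, pvSum_cons, pvShift_comb, ih x x' (fun b hb => h b (by simp [hb]))]
    have ha := h a (by simp)
    have : pvShift (some (|x - a.1| + |y - a.2.1|, false, a.2.2)) =
        some (|x' - a.1| + |y - a.2.1|, false, a.2.2) := by
      simp only [pvShift, Option.map_some, Option.some_inj, Prod.mk.injEq]
      exact ⟨by omega, trivial⟩
    rw [this]

-- the x-buckets and their concatenation over a column range
def pvBk (T : List (Int × Int × Int)) (k : Int) : List (Int × Int × Int) :=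
  T.filter (fun t => t.1 == k)

def pvFlat (T : List (Int × Int × Int)) (lo hi : Int) : List (Int × Int × Int) :=
  (PySem.List.pyRange lo hi 1).flatMap (pvBk T)

-- the two sweep invariants: summaries over px ≤ x - 1 (evaluated at x - 1)
-- and over px > x (evaluated at x)
def pvQ (T : List (Int × Int × Int)) (x y : Int) : Option (Int × Bool × Int) :=
  pvSum (pvEvalL (T.filter (fun t => decide (t.1 < 0)) ++ pvFlat T 0 x) (x - 1) y)

def pvR (T : List (Int × Int × Int)) (w x y : Int) : Option (Int × Bool × Int) :=
  pvSum (pvEvalL (pvFlat T (x + 1) w ++ T.filter (fun t => decide (t.1 ≥ w))) x y)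

lemma pvTrip_enum : ∀ (pts : List (Int × Int)) (k : Int),
    (PySem.List.enumerate pts k).map (fun e => (e.2.1, e.2.2, e.1)) = pvTrip pts k := by
  intro pts
  induction pts with
  | nil => intro k; rfl
  | cons p t ih =>
    intro k
    rw [PySem.List.enumerate_cons, List.map_cons, ih (k + 1)]
    rfl

lemma pvBucketsD (T : List (Int × Int × Int)) (w x : Int) (hx : 0 ≤ x) (hxw : x < w) :
    (((T.filter (fun t => decide (0 ≤ t.1 ∧ t.1 < w))).map
        (fun t => (t.1, (t.2.1, t.2.2)))).foldl
      (fun d p => d.modify p.1 [] (· ++ [p.2])) PySem.Dict.empty).getD x [] =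
    (pvBk T x).map (fun t => (t.2.1, t.2.2)) := by
  rw [PySem.Dict.getD_foldl_modify_append, PySem.Dict.getD_empty, List.nil_append,
      List.filter_map, List.map_map, List.filter_filter]
  unfold pvBk
  congr 1
  apply List.filter_congr
  intro t _
  by_cases ht : t.1 = x
  · simp [ht, hx, hxw]
  · simp [ht]

lemma pvFlat_nil (T : List (Int × Int × Int)) (k : Int) : pvFlat T k k = [] := by
  unfold pvFlat
  rw [PySem.List.pyRange_one_eq_nil (by omega)]
  rfl

lemma pvFlat_succ_right (T : List (Int × Int × Int)) (lo hi : Int) (h : lo ≤ hi) :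
    pvFlat T lo (hi + 1) = pvFlat T lo hi ++ pvBk T hi := by
  unfold pvFlat
  rw [PySem.List.pyRange_one_succ_right h, List.flatMap_append]
  simp

lemma pvFlat_cons (T : List (Int × Int × Int)) (lo hi : Int) (h : lo < hi) :
    pvFlat T lo hi = pvBk T lo ++ pvFlat T (lo + 1) hi := by
  unfold pvFlat
  rw [PySem.List.pyRange_one_cons h]
  rfl

lemma pvFlat_split (T : List (Int × Int × Int)) (lo mid hi : Int) (h1 : lo ≤ mid)
    (h2 : mid ≤ hi) : pvFlat T lo hi = pvFlat T lo mid ++ pvFlat T mid hi := by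
  unfold pvFlat
  rw [PySem.List.pyRange_one_append lo mid hi h1 h2, List.flatMap_append]

lemma pvMem_flat {T : List (Int × Int × Int)} {lo hi : Int} {t : Int × Int × Int}
    (h : t ∈ pvFlat T lo hi) : lo ≤ t.1 ∧ t.1 < hi := by
  unfold pvFlat at h
  rw [List.mem_flatMap] at h
  obtain ⟨k, hk, ht⟩ := h
  rw [PySem.List.mem_pyRange_one] at hk
  unfold pvBk at ht
  rw [List.mem_filter] at ht
  have : t.1 = k := by simpa using ht.2
  omega

lemma pvSum_evalL_perm {L1 L2 : List (Int × Int × Int)} {x y : Int} (h : L1.Perm L2) :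
    pvSum (pvEvalL L1 x y) = pvSum (pvEvalL L2 x y) := pvSum_perm (h.map _)

lemma pvPreStep (T : List (Int × Int × Int)) (buckets : PySem.Dict Int (List (Int × Int)))
    (w y x : Int) (hx : 0 ≤ x) (hxw : x < w)
    (hB : PySem.Dict.getD buckets x [] = (pvBk T x).map (fun t => (t.2.1, t.2.2))) :
    (PySem.Dict.getD buckets x []).foldl
      (fun c e => pvComb c (some (|e.1 - y|, false, e.2))) (pvShift (pvQ T x y)) =
    pvQ T (x + 1) y := by
  rw [hB, pvFoldl_comb, pvSumB_map]
  have hshift : pvShift (pvQ T x y) =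
      pvSum (pvEvalL (T.filter (fun t => decide (t.1 < 0)) ++ pvFlat T 0 x) x y) := by
    unfold pvQ
    apply pvShift_evalL
    intro t ht
    rcases List.mem_append.mp ht with h | h
    · have h2 := (List.mem_filter.mp h).2
      simp only [decide_eq_true_eq] at h2
      rw [abs_of_nonneg (by omega), abs_of_nonneg (by omega)]
      omega
    · have := pvMem_flat h
      rw [abs_of_nonneg (by omega), abs_of_nonneg (by omega)]
      omega
  have hbk : pvSumB (fun t => some (|((fun t => (t.2.1, t.2.2)) t).1 - y|, false,
      ((fun t => (t.2.1, t.2.2)) t).2)) (pvBk T x) = pvSum (pvEvalL (pvBk T x) x y) := by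
    rw [pvSum_evalL]
    apply pvSumB_congr
    intro t ht
    have ht1 : t.1 = x := by
      have := (List.mem_filter.mp ht).2
      simpa using this
    simp only [Option.some_inj, Prod.mk.injEq]
    refine ⟨?_, trivial⟩
    rw [ht1, abs_sub_comm t.2.1 y]
    simp
  rw [hshift, hbk, ← pvSum_append, ← pvEvalL_append, List.append_assoc,
      ← pvFlat_succ_right T 0 x hx]
  unfold pvQ
  norm_num

lemma pvSufStep (T : List (Int × Int × Int)) (buckets : PySem.Dict Int (List (Int × Int)))
    (w y x : Int) (hx : 0 ≤ x) (hxw : x + 1 < w)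
    (hB : PySem.Dict.getD buckets (x + 1) [] = (pvBk T (x + 1)).map (fun t => (t.2.1, t.2.2))) :
    pvShift ((PySem.Dict.getD buckets (x + 1) []).foldl
      (fun c e => pvComb c (some (|e.1 - y|, false, e.2))) (pvR T w (x + 1) y)) =
    pvR T w x y := by
  rw [hB, pvFoldl_comb, pvSumB_map]
  have hbk : pvSumB (fun t => some (|((fun t => (t.2.1, t.2.2)) t).1 - y|, false,
      ((fun t => (t.2.1, t.2.2)) t).2)) (pvBk T (x + 1)) =
      pvSum (pvEvalL (pvBk T (x + 1)) (x + 1) y) := by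
    rw [pvSum_evalL]
    apply pvSumB_congr
    intro t ht
    have ht1 : t.1 = x + 1 := by
      have := (List.mem_filter.mp ht).2
      simpa using this
    simp only [Option.some_inj, Prod.mk.injEq]
    refine ⟨?_, trivial⟩
    rw [ht1, abs_sub_comm t.2.1 y]
    simp
  rw [hbk]
  unfold pvR
  rw [← pvSum_append, ← pvEvalL_append,
      pvSum_evalL_perm (List.perm_append_comm
        (l₁ := pvFlat T (x + 1 + 1) w ++ T.filter (fun t => decide (t.1 ≥ w)))
        (l₂ := pvBk T (x + 1))),
      ← List.append_assoc, ← pvFlat_cons T (x + 1) w hxw]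
  apply pvShift_evalL
  intro t ht
  rcases List.mem_append.mp ht with h | h
  · have := pvMem_flat h
    rw [abs_of_nonpos (by omega), abs_of_nonpos (by omega)]
    omega
  · have h2 := (List.mem_filter.mp h).2
    simp only [ge_iff_le, decide_eq_true_eq] at h2
    rw [abs_of_nonpos (by omega), abs_of_nonpos (by omega)]
    omega

lemma pvPreFold (T : List (Int × Int × Int)) (buckets : PySem.Dict Int (List (Int × Int)))
    (w y : Int)
    (hB : ∀ x, 0 ≤ x → x < w →
      PySem.Dict.getD buckets x [] = (pvBk T x).map (fun t => (t.2.1, t.2.2))) :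
    ∀ (n : Nat), (n : Int) ≤ w →
      (PySem.List.pyRange 0 (n : Int) 1).foldl
        (fun (st : Option (Int × Bool × Int) × List (Option (Int × Bool × Int))) x =>
          let c1 := pvShift st.1
          let c2 := (buckets.getD x []).foldl
            (fun c e => pvComb c (some (|e.1 - y|, false, e.2))) c1
          (c2, st.2 ++ [c2]))
        (pvQ T 0 y, []) =
      (pvQ T (n : Int) y, (PySem.List.pyRange 0 (n : Int) 1).map (fun x => pvQ T (x + 1) y)) := by
  intro n
  induction n with
  | zero =>
    intro _
    rw [show ((0 : Nat) : Int) = 0 from rfl, PySem.List.pyRange_one_eq_nil (by omega)]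
    rfl
  | succ n ih =>
    intro hn
    have hc : ((n + 1 : Nat) : Int) = (n : Int) + 1 := by push_cast; ring
    have hn' : (n : Int) ≤ w := by omega
    rw [hc, PySem.List.pyRange_one_succ_right (by omega), List.foldl_append, ih hn',
        List.foldl_cons, List.foldl_nil]
    dsimp only
    rw [pvPreStep T buckets w y (n : Int) (by omega) (by omega) (hB _ (by omega) (by omega)),
        List.map_append]
    rfl

lemma pvSufFold (T : List (Int × Int × Int)) (buckets : PySem.Dict Int (List (Int × Int)))
    (w y : Int)
    (hB : ∀ x, 0 ≤ x → x < w →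
      PySem.Dict.getD buckets x [] = (pvBk T x).map (fun t => (t.2.1, t.2.2))) :
    ∀ (n : Nat), (n : Int) ≤ w - 1 →
      ∀ (L0 : List (Option (Int × Bool × Int))),
      (PySem.List.pyRange ((n : Int) - 1) (-1) (-1)).foldl
        (fun (st : Option (Int × Bool × Int) × List (Option (Int × Bool × Int))) x =>
          let c2 := (buckets.getD (x + 1) []).foldl
            (fun c e => pvComb c (some (|e.1 - y|, false, e.2))) st.1
          let c3 := pvShift c2
          (c3, st.2 ++ [c3]))
        (pvR T w (n : Int) y, L0) =
      (pvR T w 0 y,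
        L0 ++ (PySem.List.pyRange ((n : Int) - 1) (-1) (-1)).map (fun x => pvR T w x y)) := by
  intro n
  induction n with
  | zero =>
    intro _ L0
    rw [show ((0 : Nat) : Int) - 1 = -1 from rfl, PySem.List.pyRange_neg_one_eq_nil (by omega)]
    simp
  | succ n ih =>
    intro hn L0
    have hc : ((n + 1 : Nat) : Int) = (n : Int) + 1 := by push_cast; ring
    have hc2 : ((n : Int) + 1) - 1 = (n : Int) := by ring
    have hn' : (n : Int) ≤ w - 1 := by omega
    rw [hc, hc2, PySem.List.pyRange_neg_one_cons (by omega), List.foldl_cons]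
    dsimp only
    rw [pvSufStep T buckets w y (n : Int) (by omega) (by omega)
          (hB _ (by omega) (by omega)),
        ih hn' (L0 ++ [pvR T w (n : Int) y]),
        List.map_cons, List.append_assoc]
    rfl

lemma pvFlat_perm (T : List (Int × Int × Int)) : ∀ n : Nat,
    (pvFlat T 0 (n : Int)).Perm
      (T.filter (fun t => decide (0 ≤ t.1 ∧ t.1 < (n : Int)))) := by
  intro n
  induction n with
  | zero =>
    rw [show ((0 : Nat) : Int) = 0 from rfl, pvFlat_nil]
    rw [show T.filter (fun t => decide (0 ≤ t.1 ∧ t.1 < (0 : Int))) = [] from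
      List.filter_eq_nil_iff.mpr (by intro a _; simp only [decide_eq_true_eq]; omega)]
  | succ n ih =>
    have hc : ((n + 1 : Nat) : Int) = (n : Int) + 1 := by push_cast; ring
    rw [hc, pvFlat_succ_right T 0 (n : Int) (by omega)]
    refine (ih.append (List.Perm.refl (pvBk T (n : Int)))).trans ?_
    have hsplit := List.filter_append_perm (fun t : Int × Int × Int => decide (t.1 < (n : Int)))
      (T.filter (fun t => decide (0 ≤ t.1 ∧ t.1 < (n : Int) + 1)))
    rw [List.filter_filter, List.filter_filter] at hsplit
    refine List.Perm.trans ?_ hsplit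
    have h1 : T.filter (fun t => decide (0 ≤ t.1 ∧ t.1 < (n : Int))) =
        T.filter (fun a => decide (a.1 < (n : Int)) && decide (0 ≤ a.1 ∧ a.1 < (n : Int) + 1)) := by
      apply List.filter_congr
      intro t _
      rw [Bool.eq_iff_iff]
      simp only [Bool.and_eq_true, decide_eq_true_eq]
      omega
    have h2 : pvBk T (n : Int) =
        T.filter (fun a => !decide (a.1 < (n : Int)) && decide (0 ≤ a.1 ∧ a.1 < (n : Int) + 1)) := by
      unfold pvBk
      apply List.filter_congr
      intro t _
      rw [Bool.eq_iff_iff]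
      simp only [Bool.and_eq_true, decide_eq_true_eq, beq_iff_eq, Bool.not_eq_eq_eq_not,
        Bool.not_true, decide_eq_false_iff_not]
      omega
    rw [h1, h2]

lemma pvCellB (T : List (Int × Int × Int)) (w x y : Int) (hw : 1 ≤ w) (hx : 0 ≤ x)
    (hxw : x < w)
    (hflat : (pvFlat T 0 w).Perm (T.filter (fun t => decide (0 ≤ t.1 ∧ t.1 < w)))) :
    pvComb (pvQ T (x + 1) y) (pvR T w x y) = pvSum (pvEvalL T x y) := by
  unfold pvQ pvR
  rw [show x + 1 - 1 = x from by ring, ← pvSum_append, ← pvEvalL_append]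
  apply pvSum_evalL_perm
  rw [List.append_assoc, ← List.append_assoc (pvFlat T 0 (x + 1)),
      ← pvFlat_split T 0 (x + 1) w (by omega) (by omega)]
  have hN := List.filter_append_perm (fun t : Int × Int × Int => decide (t.1 < 0)) T
  have hsplit2 := List.filter_append_perm (fun t : Int × Int × Int => decide (t.1 < w))
    (T.filter (fun t => !decide (t.1 < 0)))
  rw [List.filter_filter, List.filter_filter] at hsplit2
  have h1 : T.filter (fun t => decide (0 ≤ t.1 ∧ t.1 < w)) =
      T.filter (fun a => decide (a.1 < w) && !decide (a.1 < 0)) := by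
    apply List.filter_congr
    intro t _
    rw [Bool.eq_iff_iff]
    simp only [Bool.and_eq_true, decide_eq_true_eq, Bool.not_eq_eq_eq_not, Bool.not_true,
      decide_eq_false_iff_not]
    omega
  have h2 : T.filter (fun t => decide (t.1 ≥ w)) =
      T.filter (fun a => !decide (a.1 < w) && !decide (a.1 < 0)) := by
    apply List.filter_congr
    intro t _
    rw [Bool.eq_iff_iff]
    simp only [ge_iff_le, Bool.and_eq_true, decide_eq_true_eq, Bool.not_eq_eq_eq_not,
      Bool.not_true, decide_eq_false_iff_not]
    omega
  refine List.Perm.trans ?_ hN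
  apply List.Perm.append_left
  refine List.Perm.trans ?_ hsplit2
  exact (hflat.trans (by rw [h1])).append (by rw [h2])

-- B's row equals the reference row
lemma pvRowB_eq (points : List (Int × Int)) (hne : points ≠ []) (w y : Int) (hw : 1 ≤ w)
    (hwdef : w = (PySem.List.max? ((0 : Int) :: points.map (·.1)) (fun v => v)).getD 0 + 1) :
    pvRowB w
      (((((PySem.List.enumerate points 0).map (fun e => (e.2.1, e.2.2, e.1))).filter
          (fun t => 0 ≤ t.1 ∧ t.1 < w)).map (fun t => (t.1, (t.2.1, t.2.2)))).foldl
        (fun d p => d.modify p.1 [] (· ++ [p.2])) PySem.Dict.empty)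
      (((PySem.List.enumerate points 0).map (fun e => (e.2.1, e.2.2, e.1))).filter
        (fun t => t.1 < 0))
      (((PySem.List.enumerate points 0).map (fun e => (e.2.1, e.2.2, e.1))).filter
        (fun t => t.1 ≥ w)) y =
    (PySem.List.pyRange 0 w 1).map (fun x => pvRef points x y) := by
  rw [pvTrip_enum points 0]
  set T := pvTrip points 0 with hT
  set buckets := (((T.filter (fun t => decide (0 ≤ t.1 ∧ t.1 < w))).map
      (fun t => (t.1, (t.2.1, t.2.2)))).foldl
    (fun d p => d.modify p.1 [] (· ++ [p.2])) PySem.Dict.empty) with hbDef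
  have hB : ∀ x, 0 ≤ x → x < w →
      PySem.Dict.getD buckets x [] = (pvBk T x).map (fun t => (t.2.1, t.2.2)) := by
    intro x hx hxw
    rw [hbDef]
    exact pvBucketsD T w x hx hxw
  unfold pvRowB
  -- the initial prefix summary
  have hcur0 : (T.filter (fun t => decide (t.1 < 0))).foldl
      (fun c t => pvComb c (some (|t.2.1 - y| + (-1 - t.1), false, t.2.2))) none =
      pvQ T 0 y := by
    rw [pvFoldl_comb]
    show pvSumB _ _ = _
    unfold pvQ
    rw [pvFlat_nil, List.append_nil, pvSum_evalL]
    apply pvSumB_congr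
    intro t ht
    have h2 := (List.mem_filter.mp ht).2
    simp only [decide_eq_true_eq] at h2
    simp only [Option.some_inj, Prod.mk.injEq]
    refine ⟨?_, trivial⟩
    rw [abs_sub_comm t.2.1 y, abs_of_nonneg (show (0 : Int) ≤ 0 - 1 - t.1 by omega)]
    omega
  -- the initial suffix summary
  have hcur1 : (T.filter (fun t => decide (t.1 ≥ w))).foldl
      (fun c t => pvComb c (some (|t.2.1 - y| + (t.1 - (w - 1)), false, t.2.2))) none =
      pvR T w (w - 1) y := by
    rw [pvFoldl_comb]
    show pvSumB _ _ = _
    unfold pvR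
    rw [show w - 1 + 1 = w from by ring, pvFlat_nil, List.nil_append, pvSum_evalL]
    apply pvSumB_congr
    intro t ht
    have h2 := (List.mem_filter.mp ht).2
    simp only [ge_iff_le, decide_eq_true_eq] at h2
    simp only [Option.some_inj, Prod.mk.injEq]
    refine ⟨?_, trivial⟩
    rw [abs_sub_comm t.2.1 y, abs_of_nonpos (show w - 1 - t.1 ≤ (0 : Int) by omega)]
    omega
  have hwcast : ((w.toNat : Nat) : Int) = w := Int.toNat_of_nonneg (by omega)
  have hps := pvPreFold T buckets w y hB w.toNat (by omega)
  rw [hwcast] at hps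
  have hw1cast : (((w - 1).toNat : Nat) : Int) = w - 1 := Int.toNat_of_nonneg (by omega)
  have hrs := pvSufFold T buckets w y hB (w - 1).toNat (by omega) [pvR T w (w - 1) y]
  rw [hw1cast, show w - 1 - 1 = w - 2 from by ring] at hrs
  rw [hcur0, hcur1]
  dsimp only
  rw [hps, hrs]
  dsimp only
  -- the reversed suffix list is the suffix summaries in column order
  have hsuf : (PySem.List.slice? ([pvR T w (w - 1) y] ++
      (PySem.List.pyRange (w - 2) (-1) (-1)).map (fun x => pvR T w x y)) none none
      (-1)).getD [] = (PySem.List.pyRange 0 w 1).map (fun x => pvR T w x y) := by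
    rw [PySem.List.slice?_none_none_neg_one, Option.getD_some, List.singleton_append]
    rw [show pvR T w (w - 1) y :: (PySem.List.pyRange (w - 2) (-1) (-1)).map
          (fun x => pvR T w x y) =
        (PySem.List.pyRange (w - 1) (-1) (-1)).map (fun x => pvR T w x y) from by
      rw [PySem.List.pyRange_neg_one_cons (a := w - 1) (b := -1) (by omega), List.map_cons,
          show w - 1 - 1 = w - 2 from by ring]]
    rw [PySem.List.pyRange_neg_one_eq_reverse, List.map_reverse, List.reverse_reverse,
        show (-1 : Int) + 1 = 0 from by ring, show w - 1 + 1 = w from by ring]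
  rw [hsuf, List.zip_map', List.map_map]
  have hflat := pvFlat_perm T w.toNat
  rw [hwcast] at hflat
  refine List.map_congr_left ?_
  intro x hx
  rw [PySem.List.mem_pyRange_one] at hx
  dsimp only [Function.comp]
  rw [pvCellB T w x y hw hx.1 hx.2 hflat]
  unfold pvRef
  cases h : pvSum (pvEvalL T x y) with
  | none => simp [h]
  | some t => simp [h]

-- ===== VERDICT (by name: the statement is the Claim_ definition above) =====
theorem build_grid_with_areas_spec : Claim_equal_build_grid_with_areas := by
  intro points _ hpre
  unfold Spec_build_grid_with_areas build_grid_with_areas build_grid_with_areas_alt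
  rw [pvDims_eq points]
  dsimp only
  simp only [PySem.List.foldl_append_singleton_eq_map, List.nil_append]
  refine List.map_congr_left ?_
  intro y _
  rw [pvRowB_eq points hpre _ y ?_ rfl]
  · refine List.map_congr_left ?_
    intro x _
    exact pvCellA points hpre x y
  · have h0 : (0 : Int) ≤ (PySem.List.max? ((0 : Int) :: points.map (·.1)) (fun v => v)).getD 0 := by
      rw [PySem.List.max?_id_cons]
      simpa using (PySem.List.le_foldl_max (points.map (·.1)) 0).1
    omega
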